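-- pv_equiv track=rewrite | github.com/mintaewon/algorithm | 프로그래머스/unrated/135808. 과일 장수/과일 장수.py | solution
-- ===== SOURCE A (Python) =====
-- def solution(k, m, score):
--     answer = 0
--     n_score = sorted(score, reverse=True)
--     for i in range(0,len(n_score), m):
--         temp = n_score[i:i+m]
--         if len(temp) == m:
--             answer += min(temp)*m
--     return answer
-- ===== SOURCE B (Python) =====
-- def solution(k, m, score):
--     if m <= 0:
--         return 0
--     freq = {}
--     for x in score:
--         freq[x] = freq.get(x, 0) + 1
--     full = len(score) // m * m
--     ans = 0
--     pos = 0
--     for v in sorted(freq, reverse=True):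
--         c = freq[v]
--         end = min(pos + c, full)
--         if pos < end:
--             ans += v * (end // m - pos // m)
--         pos += c
--     return ans * m
-- ===== Notes on version B (the rewrite author's own statement) =====
-- stated objective: alternative
-- what changed: Replaces sorting all n scores and scanning windows with min() by a frequency-counter approach: build a dict of value counts in one pass, sort only the distinct values descending, and for each value compute arithmetically (by integer division on its rank range) how many full-group minima fall on it.
import Mathlib
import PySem

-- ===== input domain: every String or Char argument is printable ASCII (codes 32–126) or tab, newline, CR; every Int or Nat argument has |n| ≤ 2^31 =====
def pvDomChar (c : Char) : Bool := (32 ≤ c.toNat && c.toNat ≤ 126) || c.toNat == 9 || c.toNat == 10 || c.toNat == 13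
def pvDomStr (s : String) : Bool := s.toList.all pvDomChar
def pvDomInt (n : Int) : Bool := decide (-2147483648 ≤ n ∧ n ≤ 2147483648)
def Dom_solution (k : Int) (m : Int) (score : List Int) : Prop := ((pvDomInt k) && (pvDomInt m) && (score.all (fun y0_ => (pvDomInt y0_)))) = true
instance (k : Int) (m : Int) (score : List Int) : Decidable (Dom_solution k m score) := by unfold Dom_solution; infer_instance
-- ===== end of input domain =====

-- B counts value frequencies in a dict, sorts only the distinct values, and counts each
-- value's contribution to the full-group minima arithmetically (objective: alternative).

-- ===== PORT A =====
-- A: sort descending, slice consecutive windows of m, add min(window)*m for each full window.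
def solution (k : Int) (m : Int) (score : List Int) : Int :=
  let nScore := PySem.List.sorted score (fun x => x) true
  (PySem.List.pyRange 0 (nScore.length : Int) m).foldl
    (fun answer i =>
      let temp := PySem.List.slice nScore (some i) (some (i + m))
      if (temp.length : Int) = m then
        -- Python's min(temp): guarded by len(temp) == m, which is > 0 whenever this branch runs
        answer + (PySem.List.min? temp (fun x => x)).getD 0 * m
      else answer) 0

-- ===== PORT B =====
-- B: frequency dict, then for each distinct value v (descending) the number of
-- full-group minima equal to v is e//m - pos//m over its descending-rank range.
def solution_alt (k : Int) (m : Int) (score : List Int) : Int :=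
  if m ≤ 0 then 0
  else
    let freq : PySem.Dict Int Int :=
      score.foldl (fun d x => d.insert x (d.getD x 0 + 1)) PySem.Dict.empty
    let full : Int := PySem.Int.floordiv (score.length : Int) m * m
    let res :=
      (PySem.List.sorted freq.keys (fun v => v) true).foldl
        (fun (ap : Int × Int) v =>
          let c := freq.getD v 0
          let e := min (ap.2 + c) full
          (if ap.2 < e then
             ap.1 + v * (PySem.Int.floordiv e m - PySem.Int.floordiv ap.2 m)
           else ap.1, ap.2 + c))
        (0, 0)
    res.1 * m

-- ===== PRECONDITION & SPEC =====
-- Pre_ excludes exactly m = 0, where Python A raises ValueError (range() step 0).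
def Pre_solution (k : Int) (m : Int) (score : List Int) : Prop := m ≠ 0
instance (k : Int) (m : Int) (score : List Int) : Decidable (Pre_solution k m score) := by
  unfold Pre_solution; infer_instance

def pvWitness_solution : Int × Int × List Int := (4, 2, [1, 2, 3, 1, 2])

def Spec_solution (k : Int) (m : Int) (score : List Int) (out : Int) : Prop := out = solution_alt k m score
instance (k : Int) (m : Int) (score : List Int) (out : Int) : Decidable (Spec_solution k m score out) := by unfold Spec_solution; infer_instance

-- ===== CLAIM (what is proved, stated in full; the proofs are below) =====
def Claim_equal_solution : Prop := ∀ (k : Int) (m : Int) (score : List Int), Dom_solution k m score → Pre_solution k m score → Spec_solution k m score (solution k m score)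

-- ===== LEMMAS AND PROOFS =====

-- B's fold step, with the counter lookup abstracted into `cnt`
def pvStep (m full : Int) (cnt : Int → Int) : (Int × Int) → Int → (Int × Int) :=
  fun ap v =>
    let c := cnt v
    let e := min (ap.2 + c) full
    (if ap.2 < e then
       ap.1 + v * (PySem.Int.floordiv e m - PySem.Int.floordiv ap.2 m)
     else ap.1, ap.2 + c)

lemma countP_range_interval (a b q : Nat) :
    (List.range q).countP (fun j => a ≤ j && j < b) = min b q - min a q := by
  induction q with
  | zero => simp
  | succ q ih =>
    rw [List.range_succ, List.countP_append, ih]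
    have h1 : List.countP (fun j => a ≤ j && j < b) [q]
        = if a ≤ q ∧ q < b then 1 else 0 := by
      by_cases h : a ≤ q ∧ q < b
      · simp [h.1, h.2]
      · rcases Decidable.not_and_iff_not_or_not.mp h with h' | h' <;>
          simp [h']
    rw [h1]
    by_cases h : a ≤ q ∧ q < b <;> [rw [if_pos h]; rw [if_neg h]] <;> omega

lemma sum_map_ite_const (L : List Nat) (P : Nat → Bool) (v : Int) :
    (L.map (fun x => if P x then v else 0)).sum = v * (L.countP P : Int) := by
  induction L with
  | nil => simp
  | cons a t ih =>
    simp only [List.map_cons, List.sum_cons, ih, List.countP_cons]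
    by_cases h : P a = true <;> simp [h] <;> ring

lemma min_mul_div (x q mN : Nat) (h : 0 < mN) : min x (q * mN) / mN = min (x / mN) q := by
  rcases le_total x (q * mN) with hx | hx
  · rw [min_eq_left hx, min_eq_left]
    have := Nat.div_le_div_right (c := mN) hx
    rwa [Nat.mul_div_cancel q h] at this
  · rw [min_eq_right hx, min_eq_right, Nat.mul_div_cancel q h]
    exact (Nat.le_div_iff_mul_le h).mpr hx

lemma idx_cond (mN p c j : Nat) (h : 0 < mN) :
    (p ≤ (j + 1) * mN - 1 ∧ (j + 1) * mN - 1 < p + c)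
      ↔ (p / mN ≤ j ∧ j < (p + c) / mN) := by
  have hX : 1 ≤ (j + 1) * mN := Nat.one_le_iff_ne_zero.mpr (by positivity)
  have h1 : p ≤ (j + 1) * mN - 1 ↔ p < (j + 1) * mN := by omega
  have h2 : p < (j + 1) * mN ↔ p / mN ≤ j := by
    rw [← Nat.div_lt_iff_lt_mul h]; omega
  have h3 : (j + 1) * mN - 1 < p + c ↔ (j + 1) * mN ≤ p + c := by omega
  have h4 : (j + 1) * mN ≤ p + c ↔ j < (p + c) / mN := by
    rw [← Nat.le_div_iff_mul_le h]; omega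
  rw [h1, h2, h3, h4]

lemma getD_split (v : Int) (c : Nat) (X : List Int) (p i : Nat) :
    (if p ≤ i then (List.replicate c v ++ X).getD (i - p) 0 else 0)
      = (if p ≤ i && i < p + c then v else 0)
        + (if p + c ≤ i then X.getD (i - (p + c)) 0 else 0) := by
  by_cases h0 : p ≤ i
  · by_cases h1 : i < p + c
    · rw [if_pos h0, if_pos (by simp [h0, h1]), if_neg (by omega)]
      rw [List.getD_append _ _ _ _ (by simp; omega),
          List.getD_eq_getElem _ _ (by simp; omega), List.getElem_replicate, add_zero]
    · rw [if_pos h0, if_neg (by simp; omega), if_pos (by omega), zero_add]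
      rw [List.getD_append_right _ _ _ _ (by simp; omega)]
      congr 1
      simp only [List.length_replicate]
      omega
  · rw [if_neg h0, if_neg (by simp; omega), if_neg (by omega), add_zero]

lemma step_val (m : Int) (mN q : Nat) (hmN : 0 < mN) (hm : m = (mN : Int))
    (a v : Int) (p c : Nat) :
    (if (p : Int) < min ((p : Int) + ((c : Nat) : Int)) (((q * mN : Nat) : Nat) : Int) then
       a + v * (PySem.Int.floordiv (min ((p : Int) + ((c : Nat) : Int)) (((q * mN : Nat) : Nat) : Int)) m
                 - PySem.Int.floordiv (p : Int) m)
     else a)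
      = a + v * (((min ((p + c) / mN) q : Nat) : Int) - ((min (p / mN) q : Nat) : Int)) := by
  have hpos : 0 < m := by omega
  have hcast : (p : Int) + ((c : Nat) : Int) = ((p + c : Nat) : Int) := by push_cast; ring
  have hmin : min (((p + c : Nat) : Int)) (((q * mN : Nat) : Int))
      = ((min (p + c) (q * mN) : Nat) : Int) := by
    rw [Nat.cast_min]
  rw [hcast, hmin]
  by_cases hlt : p < min (p + c) (q * mN)
  · rw [if_pos (by exact_mod_cast hlt)]
    have hpF : p < q * mN := by omega
    rw [PySem.Int.floordiv_eq_ediv_of_pos hpos, PySem.Int.floordiv_eq_ediv_of_pos hpos, hm,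
        ← Int.natCast_ediv, ← Int.natCast_ediv, min_mul_div _ _ _ hmN]
    have hpq : min (p / mN) q = p / mN := by
      have : p / mN < q := (Nat.div_lt_iff_lt_mul hmN).mpr (by omega)
      omega
    rw [hpq]
  · rw [if_neg (by exact_mod_cast hlt)]
    have hEq : min ((p + c) / mN) q = min (p / mN) q := by
      rcases le_total (p + c) (q * mN) with hF | hF
      · have hc0 : c = 0 := by omega
        rw [hc0, Nat.add_zero]
      · have hqp : q * mN ≤ p := by omega
        have hq1 : q ≤ p / mN := (Nat.le_div_iff_mul_le hmN).mpr hqp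
        have hq2 : q ≤ (p + c) / mN := (Nat.le_div_iff_mul_le hmN).mpr (by omega)
        omega
    rw [hEq]
    ring

lemma fold_inv (m : Int) (mN q : Nat) (hmN : 0 < mN) (hm : m = (mN : Int))
    (cnt : Int → Nat) :
    ∀ (vs : List Int) (a : Int) (p : Nat),
    (vs.foldl (pvStep m ((q * mN : Nat) : Int) (fun v => ((cnt v : Nat) : Int))) (a, (p : Int))).1
      = a + (((List.range q).map (fun j => (j + 1) * mN - 1)).map
          (fun i => if p ≤ i then
              ((vs.map (fun v => List.replicate (cnt v) v)).flatten).getD (i - p) 0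
            else 0)).sum := by
  intro vs
  induction vs with
  | nil =>
    intro a p
    simp [List.getD, Function.comp_def]
  | cons v rest ih =>
    intro a p
    rw [List.foldl_cons]
    have hstep : pvStep m ((q * mN : Nat) : Int) (fun v => ((cnt v : Nat) : Int)) (a, (p : Int)) v
        = (a + v * (((min ((p + cnt v) / mN) q : Nat) : Int) - ((min (p / mN) q : Nat) : Int)),
           ((p + cnt v : Nat) : Int)) := by
      show (_, (p : Int) + ((cnt v : Nat) : Int)) = _
      rw [step_val m mN q hmN hm a v p (cnt v)]
      exact congrArg _ (by push_cast; ring)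
    rw [hstep, ih]
    have hsplit : (((List.range q).map (fun j => (j + 1) * mN - 1)).map
        (fun i => if p ≤ i then
            (((v :: rest).map (fun w => List.replicate (cnt w) w)).flatten).getD (i - p) 0
          else 0)).sum
        = (((List.range q).map (fun j => (j + 1) * mN - 1)).map
            (fun i => if p ≤ i && i < p + cnt v then v else 0)).sum
          + (((List.range q).map (fun j => (j + 1) * mN - 1)).map
            (fun i => if p + cnt v ≤ i then
                ((rest.map (fun w => List.replicate (cnt w) w)).flatten).getD (i - (p + cnt v)) 0
              else 0)).sum := by
      rw [← List.sum_map_add]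
      apply congrArg
      apply List.map_congr_left
      intro i _
      simp only [List.map_cons, List.flatten_cons]
      exact getD_split v (cnt v) _ p i
    rw [hsplit]
    have hcnt : (((List.range q).map (fun j => (j + 1) * mN - 1)).map
        (fun i => if p ≤ i && i < p + cnt v then v else 0)).sum
        = v * (((min ((p + cnt v) / mN) q : Nat) : Int) - ((min (p / mN) q : Nat) : Int)) := by
      rw [sum_map_ite_const, List.countP_map]
      have hco : (List.range q).countP ((fun i => p ≤ i && i < p + cnt v) ∘ (fun j => (j + 1) * mN - 1))
          = (List.range q).countP (fun j => p / mN ≤ j && j < (p + cnt v) / mN) := by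
        apply List.countP_congr
        intro j _
        have := idx_cond mN p (cnt v) j hmN
        simp only [Function.comp]
        by_cases h : p / mN ≤ j ∧ j < (p + cnt v) / mN
        · simp [h.1, h.2, (this.mpr h).1, (this.mpr h).2]
        · have h2 : ¬ (p ≤ (j + 1) * mN - 1 ∧ (j + 1) * mN - 1 < p + cnt v) :=
            fun hh => h (this.mp hh)
          rcases Decidable.not_and_iff_not_or_not.mp h with h' | h' <;>
            rcases Decidable.not_and_iff_not_or_not.mp h2 with h'' | h'' <;>
            simp [h', h'']
      rw [hco, countP_range_interval]
      have hle : min (p / mN) q ≤ min ((p + cnt v) / mN) q :=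
        min_le_min (Nat.div_le_div_right (by omega)) (le_refl q)
      rw [Nat.cast_sub hle]
    rw [hcnt]
    ring

lemma flatten_count (score : List Int) (x : Int) :
    ∀ vs : List Int, vs.Nodup →
      ((vs.map (fun v => List.replicate (score.count v) v)).flatten).count x
        = if x ∈ vs then score.count x else 0 := by
  intro vs
  induction vs with
  | nil => simp
  | cons v rest ih =>
    intro hnd
    rcases List.nodup_cons.mp hnd with ⟨hvr, hrest⟩
    simp only [List.map_cons, List.flatten_cons, List.count_append, List.count_replicate,
      ih hrest, List.mem_cons]
    by_cases hx : x = v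
    · subst hx
      simp [hvr]
    · simp [hx, Ne.symm hx]

lemma flatten_perm (score vs : List Int) (hnd : vs.Nodup)
    (hmem : ∀ x, x ∈ vs ↔ x ∈ score) :
    ((vs.map (fun v => List.replicate (score.count v) v)).flatten).Perm score := by
  rw [List.perm_iff_count]
  intro x
  rw [flatten_count score x vs hnd]
  by_cases hx : x ∈ vs
  · simp [hx]
  · rw [if_neg hx, List.count_eq_zero_of_not_mem (fun h => hx ((hmem x).mpr h))]

lemma flatten_pairwise (score vs : List Int)
    (hpw : vs.Pairwise (fun a b => b ≤ a)) :
    ((vs.map (fun v => List.replicate (score.count v) v)).flatten).Pairwise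
      (fun a b => b ≤ a) := by
  rw [List.pairwise_flatten]
  constructor
  · intro l hl
    rcases List.mem_map.mp hl with ⟨v, _, rfl⟩
    exact List.pairwise_replicate.mpr (Or.inr (le_refl v))
  · rw [List.pairwise_map]
    refine hpw.imp ?_
    intro a b hab x hx y hy
    rw [List.eq_of_mem_replicate hx, List.eq_of_mem_replicate hy]
    exact hab

lemma flatten_eq_sorted_desc (score vs : List Int) (hnd : vs.Nodup)
    (hmem : ∀ x, x ∈ vs ↔ x ∈ score)
    (hpw : vs.Pairwise (fun a b => b ≤ a)) :
    (vs.map (fun v => List.replicate (score.count v) v)).flatten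
      = PySem.List.sorted score (fun x => x) true := by
  set t := PySem.List.sorted score (fun x => x) false with ht
  set r := PySem.List.sorted score (fun x => x) true with hr
  have hrt : r = t.reverse := by
    have he : r.reverse = t := by
      apply PySem.List.eq_of_perm_of_pairwise_le_of_injective (fun x => x) (fun a b h => h)
      · exact (List.reverse_perm r).trans ((PySem.List.sorted_perm _ _ _).trans
          (PySem.List.sorted_perm _ _ _).symm)
      · exact List.pairwise_reverse.mpr (PySem.List.sorted_pairwise_rev _ _)
      · exact PySem.List.sorted_pairwise _ _
    rw [← he, List.reverse_reverse]
  have he2 : ((vs.map (fun v => List.replicate (score.count v) v)).flatten).reverse = t := by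
    apply PySem.List.eq_of_perm_of_pairwise_le_of_injective (fun x => x) (fun a b h => h)
    · exact (List.reverse_perm _).trans ((flatten_perm score vs hnd hmem).trans
        (PySem.List.sorted_perm _ _ _).symm)
    · exact List.pairwise_reverse.mpr (flatten_pairwise score vs hpw)
    · exact PySem.List.sorted_pairwise _ _
  rw [hrt, ← he2, List.reverse_reverse]

lemma min_getD_of_desc (xs : List Int) (h : xs.Pairwise (fun a b => b ≤ a)) (hne : xs ≠ []) :
    (PySem.List.min? xs (fun x => x)).getD 0 = xs.getLast?.getD 0 := by
  rw [List.getLast?_eq_some_getLast (h := hne), Option.getD_some]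
  have hns : PySem.List.min? xs (fun x => x) ≠ none :=
    fun hnone => hne ((PySem.List.min?_eq_none_iff _ _).mp hnone)
  obtain ⟨v, hv⟩ := Option.ne_none_iff_exists'.mp hns
  rw [hv]
  have hmem := PySem.List.min?_mem hv
  have hmin := PySem.List.min?_isMin hv
  have hlast : ∀ y ∈ xs, xs.getLast hne ≤ y := by
    intro y hy
    obtain ⟨i, hi, hyi⟩ := List.getElem_of_mem hy
    rw [List.getLast_eq_getElem]
    subst hyi
    rcases Nat.lt_or_ge i (xs.length - 1) with hlt | hge
    · exact List.pairwise_iff_getElem.mp h i (xs.length - 1) hi (by omega) hlt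
    · have hieq : i = xs.length - 1 := by omega
      subst hieq; exact le_refl _
  exact le_antisymm (hmin _ (List.getLast_mem hne)) (hlast v hmem)

lemma block_last? (l : List Int) (a b : Nat) (hb : 0 < b) (hab : a + b ≤ l.length) :
    ((l.drop a).take b).getLast? = some (l.getD (a + b - 1) 0) := by
  have hlen : ((l.drop a).take b).length = b := by
    simp only [List.length_take, List.length_drop]; omega
  have hb1 : a + (b - 1) < l.length := by omega
  rw [List.getLast?_eq_getElem?, hlen, List.getElem?_take_of_lt (by omega : b - 1 < b),
      List.getElem?_drop, List.getElem?_eq_getElem hb1,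
      List.getD_eq_getElem _ _ (by omega : a + b - 1 < l.length)]
  exact congrArg some (getElem_congr rfl (by omega) (by omega))

lemma sum_range_ite_cut (g : Nat → Int) (c : Nat → Prop) [DecidablePred c] (q K : Nat)
    (hq : q ≤ K) (hc : ∀ k, c k ↔ k < q) :
    ((List.range K).map (fun k => if c k then g k else 0)).sum = ((List.range q).map g).sum := by
  have hK : K = q + (K - q) := by omega
  rw [hK, List.range_add, List.map_append, List.sum_append]
  have h2 : (((List.range (K - q)).map (fun j => q + j)).map (fun k => if c k then g k else 0)).sum
      = 0 := by
    apply List.sum_eq_zero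
    intro x hx
    simp only [List.map_map, List.mem_map, List.mem_range, Function.comp] at hx
    obtain ⟨j, _, hj⟩ := hx
    rw [← hj, if_neg (by rw [hc]; omega)]
  have h1 : (List.range q).map (fun k => if c k then g k else 0) = (List.range q).map g :=
    List.map_congr_left (fun k hk => if_pos ((hc k).mpr (List.mem_range.mp hk)))
  rw [h1, h2, add_zero]

lemma solution_eq_alt (k : Int) (m : Int) (score : List Int) (hm : m ≠ 0) :
    solution k m score = solution_alt k m score := by
  rcases lt_or_gt_of_ne hm with hneg | hpos
  · -- m < 0 : A's loop is empty, B's guard returns 0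
    simp only [solution, solution_alt]
    rw [if_pos (by omega : m ≤ 0), PySem.List.pyRange_of_neg _ _ hneg,
        if_neg (by omega : ¬ (((PySem.List.sorted score (fun x => x) true).length : Int) < 0))]
    simp
  · -- m > 0
    simp only [solution, solution_alt]
    rw [if_neg (by omega : ¬ m ≤ 0)]
    set r := PySem.List.sorted score (fun x => x) true with hr
    have hlenr : r.length = score.length := PySem.List.length_sorted _ _ _
    set n := score.length with hn
    set mN := m.toNat with hmN
    have hmcast : m = (mN : Int) := by omega
    have hmpos : 0 < mN := by omega
    set q := n / mN with hq
    set K := (n + mN - 1) / mN with hK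
    have hqK : q ≤ K := Nat.div_le_div_right (by omega)
    -- A side
    rw [hlenr, PySem.List.pyRange_of_pos _ _ hpos]
    have hKeq : (if (0:Int) < (n:Int) then (((n:Int) - 0 + m - 1) / m).toNat else 0) = K := by
      by_cases h0 : n = 0
      · simp [h0, hK, Nat.div_eq_of_lt (by omega : mN - 1 < mN)]
      · rw [if_pos (by exact_mod_cast Nat.pos_of_ne_zero h0)]
        have hnum : ((n:Int) - 0 + m - 1) = ((n + mN - 1 : Nat) : Int) := by
          rw [hmcast]; omega
        rw [hnum, hmcast, ← Int.natCast_ediv, Int.toNat_natCast]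
    rw [hKeq, List.foldl_map]
    have hbody : ∀ (acc : Int) (kk : Nat), kk ∈ List.range K →
        (if ((PySem.List.slice r (some (0 + m * (kk:Int))) (some (0 + m * (kk:Int) + m))).length : Int) = m then
          acc + (PySem.List.min? (PySem.List.slice r (some (0 + m * (kk:Int))) (some (0 + m * (kk:Int) + m))) (fun x => x)).getD 0 * m
        else acc)
        = acc + (if kk < q then r.getD ((kk + 1) * mN - 1) 0 * m else 0) := by
      intro acc kk _
      have hidx : (0 + m * (kk:Int)) = ((mN * kk : Nat) : Int) := by rw [hmcast]; push_cast; ring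
      have hidx2 : (0 + m * (kk:Int) + m) = ((mN * kk : Nat) : Int) + ((mN : Nat) : Int) := by
        rw [hmcast]; push_cast; ring
      rw [hidx2, hidx, PySem.List.slice_natCast_add]
      have hmul : (kk + 1) * mN = mN * kk + mN := by ring
      have hlen : ((r.drop (mN * kk)).take mN).length = min mN (n - mN * kk) := by
        simp [hlenr]
      have hcond : ((((r.drop (mN * kk)).take mN).length : Nat) : Int) = m ↔ kk < q := by
        rw [hlen, hmcast, Nat.cast_inj, hq]
        constructor
        · intro h
          have hle : (kk + 1) * mN ≤ n := by omega
          have := (Nat.le_div_iff_mul_le hmpos).mpr hle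
          omega
        · intro h
          have := (Nat.le_div_iff_mul_le hmpos).mp (by omega : kk + 1 ≤ n / mN)
          omega
      by_cases hfull : kk < q
      · rw [if_pos (hcond.mpr hfull), if_pos hfull]
        have hle : (kk + 1) * mN ≤ n := by
          have := (Nat.le_div_iff_mul_le hmpos).mp (by omega : kk + 1 ≤ q)
          omega
        have hlm : ((r.drop (mN * kk)).take mN).length = mN := by rw [hlen]; omega
        have hne : (r.drop (mN * kk)).take mN ≠ [] := by
          intro hnil; rw [hnil] at hlm; simp at hlm; omega
        rw [min_getD_of_desc _ (List.Pairwise.sublist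
            ((List.take_sublist _ _).trans (List.drop_sublist _ _))
            (PySem.List.sorted_pairwise_rev score (fun x => x))) hne,
          block_last? r (mN * kk) mN hmpos (by omega), Option.getD_some]
        have hieq : mN * kk + mN - 1 = (kk + 1) * mN - 1 := by
          have : mN * kk + mN = (kk + 1) * mN := by ring
          omega
        rw [hieq]
      · rw [if_neg (fun h => hfull (hcond.mp h)), if_neg hfull, add_zero]
    rw [PySem.List.foldl_congr_mem _ _
          (fun acc kk => acc + (if kk < q then r.getD ((kk + 1) * mN - 1) 0 * m else 0)) _ hbody,
        PySem.List.foldl_add, zero_add,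
        sum_range_ite_cut _ _ q K hqK (fun _ => Iff.rfl), List.sum_map_mul_right]
    -- B side
    rw [PySem.Dict.foldl_insert_getD_add_one_eq_counter, PySem.Dict.keys_counter]
    set vs := PySem.List.sorted (PySem.Set.ofList score) (fun v => v) true with hvs
    have hnd : vs.Nodup :=
      (PySem.List.sorted_perm _ _ _).symm.nodup (PySem.Set.nodup_ofList score)
    have hmem : ∀ x, x ∈ vs ↔ x ∈ score := by
      intro x
      rw [(PySem.List.sorted_perm _ _ _).mem_iff, PySem.Set.mem_ofList]
    have hpw : vs.Pairwise (fun a b => b ≤ a) := PySem.List.sorted_pairwise_rev _ _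
    have hfull : PySem.Int.floordiv ((n : Nat) : Int) m * m = ((q * mN : Nat) : Int) := by
      rw [PySem.Int.floordiv_eq_ediv_of_pos hpos, hmcast, ← Int.natCast_ediv,
        ← Nat.cast_mul, hq]
    have hfun : (fun (ap : Int × Int) v =>
          ((if ap.2 < min (ap.2 + (PySem.Dict.counter score).getD v 0)
                (PySem.Int.floordiv ((n : Nat) : Int) m * m) then
              ap.1 + v * (PySem.Int.floordiv (min (ap.2 + (PySem.Dict.counter score).getD v 0)
                  (PySem.Int.floordiv ((n : Nat) : Int) m * m)) m
                - PySem.Int.floordiv ap.2 m)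
            else ap.1), ap.2 + (PySem.Dict.counter score).getD v 0))
        = pvStep m ((q * mN : Nat) : Int) (fun v => ((score.count v : Nat) : Int)) := by
      funext ap v
      simp only [pvStep, PySem.Dict.getD_counter, hfull]
    rw [hfun]
    have h0 : ((0 : Int), (0 : Int)) = ((0 : Int), ((0 : Nat) : Int)) := by norm_num
    rw [h0, fold_inv m mN q hmpos hmcast (fun v => score.count v) vs 0 0, zero_add]
    rw [flatten_eq_sorted_desc score vs hnd hmem hpw]
    have hmaps : (((List.range q).map (fun j => (j + 1) * mN - 1)).map
        (fun i => if 0 ≤ i then r.getD (i - 0) 0 else 0))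
        = (List.range q).map (fun kk => r.getD ((kk + 1) * mN - 1) 0) := by
      rw [List.map_map]
      apply List.map_congr_left
      intro j _
      simp
    rw [hmaps]

-- ===== VERDICT (by name: the statement is the Claim_ definition above) =====
theorem solution_spec : Claim_equal_solution := by
  intro k m score _ hm
  exact solution_eq_alt k m score hm
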